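-- pv_equiv track=rewrite | github.com/Dixtosa/Electrython | v1.1/source/Electrons.py | Vec_Add
-- ===== SOURCE A (Python) =====
-- def Vec_Add(main,others):
--     while True:
--         if len(others)>=2:
--             f=others[0]
--             s=others[1]
--             tmp_X=s[0]-main[0]
--             tmp_Y=f[1]-main[1]
--             tmp=[f[0]+tmp_X,s[1]+tmp_Y]
--             others.remove(f)
--             others.remove(s)
--             others.insert(0,tmp)
--         else:
--             break
--     return [main,others[0]]
-- ===== SOURCE B (Python) =====
-- def Vec_Add(main, others):
--     if len(others) == 1:
--         return [main, others[0]]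
--     n = len(others)
--     sx = sum(v[0] for v in others)
--     sy = sum(v[1] for v in others)
--     return [main, [sx - (n - 1) * main[0], sy - (n - 1) * main[1]]]
-- ===== Notes on version B (the rewrite author's own statement) =====
-- stated objective: alternative
-- what changed: Replaces the destructive pairwise-combining while-loop (remove/remove/insert on the list) by a direct closed form: the folded vector is [sum_x-(n-1)*main_x, sum_y-(n-1)*main_y] computed in one pass over the list.
import Mathlib
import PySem

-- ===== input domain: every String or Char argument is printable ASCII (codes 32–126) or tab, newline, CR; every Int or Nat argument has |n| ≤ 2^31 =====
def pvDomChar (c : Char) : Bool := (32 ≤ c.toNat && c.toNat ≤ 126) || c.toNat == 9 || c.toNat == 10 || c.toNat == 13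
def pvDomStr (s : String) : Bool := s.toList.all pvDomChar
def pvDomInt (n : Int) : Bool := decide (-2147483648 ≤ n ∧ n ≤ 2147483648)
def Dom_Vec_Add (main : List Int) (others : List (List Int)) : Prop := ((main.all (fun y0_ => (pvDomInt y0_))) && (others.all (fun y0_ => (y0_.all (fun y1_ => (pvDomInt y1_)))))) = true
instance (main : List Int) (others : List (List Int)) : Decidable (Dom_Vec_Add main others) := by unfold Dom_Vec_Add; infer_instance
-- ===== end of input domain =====

-- B replaces A's destructive pairwise-folding while-loop by a one-pass closed-form sum
-- (return value only: A mutates `others` in place, B does not).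

-- ===== PORT A =====
-- one body of A's `while True` loop (the len(others)>=2 case)
def vecAddStep (main : List Int) (others : List (List Int)) : List (List Int) :=
  let f := PySem.List.pyGetD others 0 []
  let s := PySem.List.pyGetD others 1 []
  let tmp_X := PySem.List.pyGetD s 0 0 - PySem.List.pyGetD main 0 0
  let tmp_Y := PySem.List.pyGetD f 1 0 - PySem.List.pyGetD main 1 0
  let tmp := [PySem.List.pyGetD f 0 0 + tmp_X, PySem.List.pyGetD s 1 0 + tmp_Y]
  let o1 := (PySem.List.remove? others f).getD others
  let o2 := (PySem.List.remove? o1 s).getD o1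
  PySem.List.insert o2 0 tmp

-- A's `while True` loop; each pass shortens the list by one, so `others.length` fuel suffices
def vecAddLoop (main : List Int) : Nat → List (List Int) → List (List Int)
  | 0, others => others
  | fuel + 1, others =>
      if 2 ≤ others.length then vecAddLoop main fuel (vecAddStep main others) else others

def Vec_Add (main : List Int) (others : List (List Int)) : List (List Int) :=
  let res := vecAddLoop main others.length others
  [main, PySem.List.pyGetD res 0 []]

-- ===== PORT B =====
def Vec_Add_alt (main : List Int) (others : List (List Int)) : List (List Int) :=
  if others.length = 1 then [main, PySem.List.pyGetD others 0 []]
  else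
    let n : Int := others.length
    let sx := (others.map (fun v => PySem.List.pyGetD v 0 0)).sum
    let sy := (others.map (fun v => PySem.List.pyGetD v 1 0)).sum
    [main, [sx - (n - 1) * PySem.List.pyGetD main 0 0, sy - (n - 1) * PySem.List.pyGetD main 1 0]]

-- ===== PRECONDITION & SPEC =====
-- Pre_ excludes exactly the inputs where A raises IndexError: empty `others`, and (whenever the
-- combining loop runs, i.e. len(others) >= 2) a `main` or an element of `others` shorter than 2.
def Pre_Vec_Add (main : List Int) (others : List (List Int)) : Prop :=
  others ≠ [] ∧ (2 ≤ others.length → 2 ≤ main.length ∧ ∀ v ∈ others, 2 ≤ v.length)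
instance (main : List Int) (others : List (List Int)) : Decidable (Pre_Vec_Add main others) := by
  unfold Pre_Vec_Add; infer_instance

def pvWitness_Vec_Add : List Int × List (List Int) := ([0, 0], [[1, 2], [3, 4]])

def Spec_Vec_Add (main : List Int) (others : List (List Int)) (out : List (List Int)) : Prop := out = Vec_Add_alt main others
instance (main : List Int) (others : List (List Int)) (out : List (List Int)) : Decidable (Spec_Vec_Add main others out) := by unfold Spec_Vec_Add; infer_instance

-- ===== CLAIM (what is proved, stated in full; the proofs are below) =====
def Claim_equal_Vec_Add : Prop := ∀ (main : List Int) (others : List (List Int)), Dom_Vec_Add main others → Pre_Vec_Add main others → Spec_Vec_Add main others (Vec_Add main others)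

-- ===== LEMMAS AND PROOFS =====

lemma pyGetD_two_one (a b : Int) : PySem.List.pyGetD [a, b] 1 0 = b := by
  rw [PySem.List.pyGetD_ofNat']; rfl

lemma vecAddStep_cons (main : List Int) (f s : List Int) (rest : List (List Int)) :
    vecAddStep main (f :: s :: rest) =
      [PySem.List.pyGetD f 0 0 + (PySem.List.pyGetD s 0 0 - PySem.List.pyGetD main 0 0),
       PySem.List.pyGetD s 1 0 + (PySem.List.pyGetD f 1 0 - PySem.List.pyGetD main 1 0)] :: rest := by
  simp only [vecAddStep, PySem.List.pyGetD_ofNat',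
    List.getD_cons_succ, List.getD_cons_zero, PySem.List.remove?_cons_self, Option.getD_some,
    PySem.List.insert_zero]

lemma vecAddLoop_short (main : List Int) (fuel : Nat) (l : List (List Int)) (h : l.length < 2) :
    vecAddLoop main fuel l = l := by
  cases fuel with
  | zero => rfl
  | succ n => simp [vecAddLoop, Nat.not_le.mpr h]

lemma vecAddLoop_closed (fuel : Nat) : ∀ (l : List (List Int)) (main : List Int),
    2 ≤ l.length → l.length ≤ fuel + 1 →
    vecAddLoop main fuel l =
      [[(l.map (fun v => PySem.List.pyGetD v 0 0)).sum - ((l.length : Int) - 1) * PySem.List.pyGetD main 0 0,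
        (l.map (fun v => PySem.List.pyGetD v 1 0)).sum - ((l.length : Int) - 1) * PySem.List.pyGetD main 1 0]] := by
  induction fuel with
  | zero => intro l main h2 hf; omega
  | succ n ih =>
    intro l main h2 hf
    match l with
    | f :: s :: rest =>
      rw [vecAddLoop]
      rw [if_pos (by simp)]
      rw [vecAddStep_cons]
      cases rest with
      | nil =>
        rw [vecAddLoop_short main n _ (by simp)]
        simp [pyGetD_two_one]
        constructor <;> ring
      | cons r rs =>
        rw [ih _ main (by simp) (by simp at hf ⊢; omega)]
        simp [pyGetD_two_one]
        constructor <;> ring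

-- ===== VERDICT (by name: the statement is the Claim_ definition above) =====
theorem Vec_Add_spec : Claim_equal_Vec_Add := by
  intro main others _ hpre
  unfold Spec_Vec_Add Vec_Add Vec_Add_alt
  obtain ⟨hne, -⟩ := hpre
  by_cases h1 : others.length = 1
  · match others, h1 with
    | [x], _ =>
      rw [vecAddLoop_short main _ _ (by simp)]
      simp
  · have h2 : 2 ≤ others.length := by
      cases others with
      | nil => exact absurd rfl hne
      | cons a t =>
        cases t with
        | nil => simp at h1
        | cons b u => simp
    rw [vecAddLoop_closed others.length others main h2 (by omega), if_neg h1]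
    simp [PySem.List.pyGetD_zero_cons]
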